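-- pv_equiv track=rewrite | github.com/MrBrantCode/unitest_baseline | mut_generate/mist_train_taco/taco_3113/solution.py | count_wall_groups
-- ===== SOURCE A (Python) =====
-- MOD = 1000000007
--
-- def count_wall_groups(N):
--     if N == 1:
--         return 1
--     elif N == 2:
--         return 2
--     elif N == 3:
--         return 4
--
--     t1, t2, t3 = 1, 2, 4
--     for _ in range(N - 3):
--         ans = (t1 + t2 + t3) % MOD
--         t1, t2, t3 = t2, t3, ans
--
--     return ans
-- ===== SOURCE B (Python) =====
-- MOD = 1000000007
--
-- def count_wall_groups(N):
--     if N == 1: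
--         return 1
--     if N == 2:
--         return 2
--     if N == 3:
--         return 4
--     def mul(X, Y):
--         return (
--             (X[0]*Y[0] + X[1]*Y[3] + X[2]*Y[6]) % MOD,
--             (X[0]*Y[1] + X[1]*Y[4] + X[2]*Y[7]) % MOD,
--             (X[0]*Y[2] + X[1]*Y[5] + X[2]*Y[8]) % MOD,
--             (X[3]*Y[0] + X[4]*Y[3] + X[5]*Y[6]) % MOD,
--             (X[3]*Y[1] + X[4]*Y[4] + X[5]*Y[7]) % MOD,
--             (X[3]*Y[2] + X[4]*Y[5] + X[5]*Y[8]) % MOD,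
--             (X[6]*Y[0] + X[7]*Y[3] + X[8]*Y[6]) % MOD,
--             (X[6]*Y[1] + X[7]*Y[4] + X[8]*Y[7]) % MOD,
--             (X[6]*Y[2] + X[7]*Y[5] + X[8]*Y[8]) % MOD,
--         )
--     R = (1, 0, 0, 0, 1, 0, 0, 0, 1)
--     M = (1, 1, 1, 1, 0, 0, 0, 1, 0)
--     e = N - 3
--     while e > 0:
--         if e & 1:
--             R = mul(R, M)
--         M = mul(M, M)
--         e >>= 1
--     return (R[0] * 4 + R[1] * 2 + R[2] * 1) % MOD
-- ===== Notes on version B (the rewrite author's own statement) =====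
-- stated objective: faster
-- what changed: Replaced the O(N) tribonacci loop by 3x3 matrix exponentiation by squaring mod 1e9+7 (O(log N) multiplications).
import Mathlib
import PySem

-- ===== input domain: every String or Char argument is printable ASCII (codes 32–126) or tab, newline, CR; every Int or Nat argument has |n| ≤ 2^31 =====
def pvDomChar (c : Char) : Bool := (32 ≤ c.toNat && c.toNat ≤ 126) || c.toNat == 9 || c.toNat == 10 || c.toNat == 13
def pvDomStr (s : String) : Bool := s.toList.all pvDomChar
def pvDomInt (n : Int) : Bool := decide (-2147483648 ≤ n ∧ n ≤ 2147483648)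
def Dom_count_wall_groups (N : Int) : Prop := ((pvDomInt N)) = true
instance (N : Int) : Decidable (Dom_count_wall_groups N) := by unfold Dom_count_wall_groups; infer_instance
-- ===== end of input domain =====

-- B replaces A's linear tribonacci loop by 3x3 matrix exponentiation by squaring mod 1e9+7.


-- ===== PORT A =====
-- the 'for _ in range(N-3)' loop; state is ((t1, t2, t3), ans); ans starts at 0 standing in for
-- Python's unbound 'ans' (Pre_ guarantees this branch is only reached with N ≥ 4, so the loop runs ≥ 1 time)
def pvLoopA : Nat → (Int × Int × Int) × Int → (Int × Int × Int) × Int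
  | 0, st => st
  | k + 1, ((t1, t2, t3), _) =>
      let ans := PySem.Int.mod (t1 + t2 + t3) 1000000007
      pvLoopA k ((t2, t3, ans), ans)

def count_wall_groups (N : Int) : Int :=
  if N = 1 then 1
  else if N = 2 then 2
  else if N = 3 then 4
  else (pvLoopA (N - 3).toNat ((1, 2, 4), 0)).2

-- ===== PORT B =====
-- a 3x3 matrix as a flat 9-tuple (row major), as in Source B
abbrev pvMtx : Type := Int × Int × Int × Int × Int × Int × Int × Int × Int

def pvMul (X Y : pvMtx) : pvMtx :=
  match X, Y with
  | (x0, x1, x2, x3, x4, x5, x6, x7, x8), (y0, y1, y2, y3, y4, y5, y6, y7, y8) =>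
    (PySem.Int.mod (x0*y0 + x1*y3 + x2*y6) 1000000007,
     PySem.Int.mod (x0*y1 + x1*y4 + x2*y7) 1000000007,
     PySem.Int.mod (x0*y2 + x1*y5 + x2*y8) 1000000007,
     PySem.Int.mod (x3*y0 + x4*y3 + x5*y6) 1000000007,
     PySem.Int.mod (x3*y1 + x4*y4 + x5*y7) 1000000007,
     PySem.Int.mod (x3*y2 + x4*y5 + x5*y8) 1000000007,
     PySem.Int.mod (x6*y0 + x7*y3 + x8*y6) 1000000007,
     PySem.Int.mod (x6*y1 + x7*y4 + x8*y7) 1000000007,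
     PySem.Int.mod (x6*y2 + x7*y5 + x8*y8) 1000000007)

-- the 'while e > 0' binary-exponentiation loop of Source B; for e ≥ 0, 'e & 1' is 'e % 2 = 1'
-- and 'e >>= 1' is 'e / 2' (the Nat argument is the loop variable e)
def pvPowLoop : Nat → pvMtx → pvMtx → pvMtx
  | 0, r, _ => r
  | e + 1, r, m =>
      pvPowLoop ((e + 1) / 2) (if (e + 1) % 2 = 1 then pvMul r m else r) (pvMul m m)
  decreasing_by omega

def count_wall_groups_alt (N : Int) : Int :=
  if N = 1 then 1
  else if N = 2 then 2
  else if N = 3 then 4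
  else
    let R := pvPowLoop (N - 3).toNat (1, 0, 0, 0, 1, 0, 0, 0, 1) (1, 1, 1, 1, 0, 0, 0, 1, 0)
    -- R[0], R[1], R[2] are the first three components of the 9-tuple
    PySem.Int.mod (R.1 * 4 + R.2.1 * 2 + R.2.2.1 * 1) 1000000007

-- ===== PRECONDITION & SPEC =====
-- Pre_ excludes exactly N ≤ 0, where A raises UnboundLocalError ('ans' is never assigned).
def Pre_count_wall_groups (N : Int) : Prop := 1 ≤ N
instance (N : Int) : Decidable (Pre_count_wall_groups N) := by unfold Pre_count_wall_groups; infer_instance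
def pvWitness_count_wall_groups : Int := 7

def Spec_count_wall_groups (N : Int) (out : Int) : Prop := out = count_wall_groups_alt N
instance (N : Int) (out : Int) : Decidable (Spec_count_wall_groups N out) := by unfold Spec_count_wall_groups; infer_instance

-- ===== CLAIM (what is proved, stated in full; the proofs are below) =====
def Claim_equal_count_wall_groups : Prop := ∀ (N : Int), Dom_count_wall_groups N → Pre_count_wall_groups N → Spec_count_wall_groups N (count_wall_groups N)

-- ===== LEMMAS AND PROOFS =====

-- the (already reduced) tribonacci sequence mod 1e9+7 both programs compute
def pvT : Nat → Int
  | 0 => 1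
  | 1 => 2
  | 2 => 4
  | n + 3 => (pvT n + pvT (n + 1) + pvT (n + 2)) % 1000000007

lemma pvmod_eq (a : Int) : PySem.Int.mod a 1000000007 = a % 1000000007 :=
  PySem.Int.mod_eq_emod_of_pos (by norm_num)

lemma pvT_red (n : Nat) : pvT n % 1000000007 = pvT n := by
  match n with
  | 0 | 1 | 2 => decide
  | n + 3 => simp [pvT, Int.emod_emod_of_dvd]

-- A's loop walks the sequence
lemma pvLoopA_T (k : Nat) : ∀ (n : Nat) (x : Int),
    pvLoopA (k + 1) ((pvT n, pvT (n + 1), pvT (n + 2)), x)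
      = ((pvT (n + k + 1), pvT (n + k + 2), pvT (n + k + 3)), pvT (n + k + 3)) := by
  induction k with
  | zero => intro n x; simp [pvLoopA, pvmod_eq, pvT]  -- pvmod_eq harmless if unused
  | succ k ih =>
      intro n x
      rw [pvLoopA]
      simp only [pvmod_eq]
      have ha : (pvT n + pvT (n + 1) + pvT (n + 2)) % 1000000007 = pvT (n + 3) := rfl
      rw [ha]
      have e1 : n + 2 = n + 1 + 1 := by omega
      have e2 : n + 3 = n + 1 + 2 := by omega
      have e3 : n + (k + 1) + 1 = n + 1 + k + 1 := by omega
      have e4 : n + (k + 1) + 2 = n + 1 + k + 2 := by omega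
      have e5 : n + (k + 1) + 3 = n + 1 + k + 3 := by omega
      rw [e1, e2, e3, e4, e5]
      exact ih (n + 1) _

-- reduced-ness of a matrix (every entry already reduced mod 1e9+7)
def pvRed (X : pvMtx) : Prop :=
  match X with
  | (x0, x1, x2, x3, x4, x5, x6, x7, x8) =>
      x0 % 1000000007 = x0 ∧ x1 % 1000000007 = x1 ∧ x2 % 1000000007 = x2 ∧
      x3 % 1000000007 = x3 ∧ x4 % 1000000007 = x4 ∧ x5 % 1000000007 = x5 ∧
      x6 % 1000000007 = x6 ∧ x7 % 1000000007 = x7 ∧ x8 % 1000000007 = x8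

lemma pvRed_mul (X Y : pvMtx) : pvRed (pvMul X Y) := by
  obtain ⟨x0,x1,x2,x3,x4,x5,x6,x7,x8⟩ := X
  obtain ⟨y0,y1,y2,y3,y4,y5,y6,y7,y8⟩ := Y
  simp only [pvMul, pvmod_eq, pvRed]
  refine ⟨?_,?_,?_,?_,?_,?_,?_,?_,?_⟩ <;> exact Int.emod_emod_of_dvd _ dvd_rfl

-- entry-level modular arithmetic: dropping the inner reductions of a 3-term dot product
lemma pvkeyL (x y z u v w : Int) :
    (x % 1000000007 * u + y % 1000000007 * v + z % 1000000007 * w) % 1000000007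
      = (x * u + y * v + z * w) % 1000000007 := by
  have hx : x % 1000000007 ≡ x [ZMOD 1000000007] := Int.emod_emod_of_dvd x dvd_rfl
  have hy : y % 1000000007 ≡ y [ZMOD 1000000007] := Int.emod_emod_of_dvd y dvd_rfl
  have hz : z % 1000000007 ≡ z [ZMOD 1000000007] := Int.emod_emod_of_dvd z dvd_rfl
  exact ((hx.mul_right u).add (hy.mul_right v)).add (hz.mul_right w)

lemma pvkeyR (x y z u v w : Int) :
    (u * (x % 1000000007) + v * (y % 1000000007) + w * (z % 1000000007)) % 1000000007
      = (u * x + v * y + w * z) % 1000000007 := by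
  have hx : x % 1000000007 ≡ x [ZMOD 1000000007] := Int.emod_emod_of_dvd x dvd_rfl
  have hy : y % 1000000007 ≡ y [ZMOD 1000000007] := Int.emod_emod_of_dvd y dvd_rfl
  have hz : z % 1000000007 ≡ z [ZMOD 1000000007] := Int.emod_emod_of_dvd z dvd_rfl
  exact ((hx.mul_left u).add (hy.mul_left v)).add (hz.mul_left w)

lemma pvMul_assoc (X Y Z : pvMtx) : pvMul (pvMul X Y) Z = pvMul X (pvMul Y Z) := by
  obtain ⟨x0,x1,x2,x3,x4,x5,x6,x7,x8⟩ := X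
  obtain ⟨y0,y1,y2,y3,y4,y5,y6,y7,y8⟩ := Y
  obtain ⟨z0,z1,z2,z3,z4,z5,z6,z7,z8⟩ := Z
  simp only [pvMul, pvmod_eq, Prod.mk.injEq]
  refine ⟨?_,?_,?_,?_,?_,?_,?_,?_,?_⟩ <;>
    (rw [pvkeyL, pvkeyR]; congr 1; ring)

def pvI : pvMtx := (1, 0, 0, 0, 1, 0, 0, 0, 1)
def pvM : pvMtx := (1, 1, 1, 1, 0, 0, 0, 1, 0)

lemma pvRed_I : pvRed pvI := by
  refine ⟨?_,?_,?_,?_,?_,?_,?_,?_,?_⟩ <;> decide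

lemma pvRed_M : pvRed pvM := by
  refine ⟨?_,?_,?_,?_,?_,?_,?_,?_,?_⟩ <;> decide

lemma pvMul_I_right (X : pvMtx) (h : pvRed X) : pvMul X pvI = X := by
  obtain ⟨x0,x1,x2,x3,x4,x5,x6,x7,x8⟩ := X
  obtain ⟨h0,h1,h2,h3,h4,h5,h6,h7,h8⟩ := h
  simp only [pvMul, pvI, pvmod_eq, mul_one, mul_zero, add_zero, zero_add, Prod.mk.injEq]
  exact ⟨h0,h1,h2,h3,h4,h5,h6,h7,h8⟩

lemma pvMul_I_left (X : pvMtx) (h : pvRed X) : pvMul pvI X = X := by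
  obtain ⟨x0,x1,x2,x3,x4,x5,x6,x7,x8⟩ := X
  obtain ⟨h0,h1,h2,h3,h4,h5,h6,h7,h8⟩ := h
  simp only [pvMul, pvI, pvmod_eq, one_mul, zero_mul, add_zero, zero_add, Prod.mk.injEq]
  exact ⟨h0,h1,h2,h3,h4,h5,h6,h7,h8⟩

-- plain left-to-right power
def pvPw (m : pvMtx) : Nat → pvMtx
  | 0 => pvI
  | k + 1 => pvMul (pvPw m k) m

lemma pvRed_pw (m : pvMtx) : ∀ k, pvRed (pvPw m k)
  | 0 => pvRed_I
  | _ + 1 => pvRed_mul _ _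

lemma pvPw_comm (m : pvMtx) (hm : pvRed m) (k : Nat) :
    pvMul m (pvPw m k) = pvMul (pvPw m k) m := by
  induction k with
  | zero => rw [pvPw, pvMul_I_right m hm, pvMul_I_left m hm]
  | succ k ih => rw [pvPw, ← pvMul_assoc, ih]

lemma pvPw_sq (m : pvMtx) (k : Nat) : pvPw (pvMul m m) k = pvPw m (2 * k) := by
  induction k with
  | zero => rfl
  | succ k ih =>
      have h : 2 * (k + 1) = 2 * k + 1 + 1 := by ring
      rw [pvPw, ih, h, pvPw, pvPw, pvMul_assoc]

lemma pvPowLoop_pw (e : Nat) : ∀ (r m : pvMtx), pvRed r → pvRed m →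
    pvPowLoop e r m = pvMul r (pvPw m e) := by
  induction e using Nat.strong_induction_on with
  | _ e ih =>
    match e with
    | 0 =>
        intro r m hr _
        rw [pvPowLoop, pvPw, pvMul_I_right r hr]
    | e + 1 =>
        intro r m hr hm
        rw [pvPowLoop]
        have hlt : (e + 1) / 2 < e + 1 := by omega
        rcases Nat.even_or_odd (e + 1) with he | he
        · have h2 : (e + 1) % 2 = 0 := Nat.even_iff.mp he
          have he2 : 2 * ((e + 1) / 2) = e + 1 := by omega
          rw [if_neg (by omega), ih _ hlt r _ hr (pvRed_mul m m), pvPw_sq, he2]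
        · have h2 : (e + 1) % 2 = 1 := Nat.odd_iff.mp he
          have he2 : 2 * ((e + 1) / 2) + 1 = e + 1 := by omega
          have hps : pvPw m (2 * ((e + 1) / 2) + 1)
              = pvMul (pvPw m (2 * ((e + 1) / 2))) m := rfl
          rw [if_pos h2, ih _ hlt _ _ (pvRed_mul r m) (pvRed_mul m m), pvPw_sq,
              pvMul_assoc, pvPw_comm m hm, ← hps, he2]

-- action of a power of the step matrix on the (column) tribonacci vector
lemma pvPw_act (e : Nat) : ∀ (k : Nat),
    pvMul (pvPw pvM e) (pvT (k + 2), 0, 0, pvT (k + 1), 0, 0, pvT k, 0, 0)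
      = (pvT (k + e + 2), 0, 0, pvT (k + e + 1), 0, 0, pvT (k + e), 0, 0) := by
  induction e with
  | zero =>
      intro k
      have hv : pvRed (pvT (k + 2), 0, 0, pvT (k + 1), 0, 0, pvT k, 0, 0) := by
        refine ⟨pvT_red _, ?_, ?_, pvT_red _, ?_, ?_, pvT_red _, ?_, ?_⟩ <;>
          exact Int.zero_emod _
      rw [pvPw, pvMul_I_left _ hv]
      simp only [Nat.add_zero]
  | succ e ih =>
      intro k
      have hstep : pvMul pvM (pvT (k + 2), 0, 0, pvT (k + 1), 0, 0, pvT k, 0, 0)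
          = (pvT (k + 3), 0, 0, pvT (k + 2), 0, 0, pvT (k + 1), 0, 0) := by
        have hT : pvT (k + 3) = (pvT k + pvT (k + 1) + pvT (k + 2)) % 1000000007 := rfl
        simp only [pvM, pvMul, pvmod_eq, one_mul, zero_mul, mul_zero, add_zero,
          zero_add, Int.zero_emod, pvT_red, Prod.mk.injEq, hT]
        refine ⟨?_, trivial⟩
        congr 1; ring
      have e3 : k + (e + 1) + 2 = k + 1 + e + 2 := by omega
      have e4 : k + (e + 1) + 1 = k + 1 + e + 1 := by omega
      have e5 : k + (e + 1) = k + 1 + e := by omega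
      rw [pvPw, pvMul_assoc, hstep, e3, e4, e5]
      exact ih (k + 1)

-- ===== VERDICT (by name: the statement is the Claim_ definition above) =====
theorem count_wall_groups_spec : Claim_equal_count_wall_groups := by
  intro N _ hpre
  unfold Spec_count_wall_groups count_wall_groups count_wall_groups_alt
  by_cases h1 : N = 1
  · simp [h1]
  by_cases h2 : N = 2
  · simp [h1, h2]
  by_cases h3 : N = 3
  · simp [h1, h2, h3]
  have hN : 4 ≤ N := by
    have : 1 ≤ N := hpre
    omega
  rw [if_neg h1, if_neg h2, if_neg h3, if_neg h1, if_neg h2, if_neg h3]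
  obtain ⟨e, he⟩ : ∃ e : Nat, (N - 3).toNat = e + 1 := ⟨(N - 3).toNat - 1, by omega⟩
  rw [he]
  -- A's loop value
  have hA : (pvLoopA (e + 1) ((pvT 0, pvT 1, pvT 2), (0 : Int))).2 = pvT (e + 3) := by
    rw [pvLoopA_T e 0 0]
    simp [Nat.zero_add]
  -- B's matrix value
  have hR : pvPowLoop (e + 1) pvI pvM = pvPw pvM (e + 1) :=
    (pvPowLoop_pw (e + 1) pvI pvM pvRed_I pvRed_M).trans
      (pvMul_I_left _ (pvRed_pw pvM (e + 1)))
  have hact := pvPw_act (e + 1) 0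
  simp only [Nat.zero_add] at hact
  have key : ∀ (R : pvMtx),
      pvMul R (4, 0, 0, 2, 0, 0, 1, 0, 0)
        = (pvT (e + 3), 0, 0, pvT (e + 2), 0, 0, pvT (e + 1), 0, 0) →
      PySem.Int.mod (R.1 * 4 + R.2.1 * 2 + R.2.2.1 * 1) 1000000007 = pvT (e + 3) := by
    rintro ⟨r0, r1, r2, r3, r4, r5, r6, r7, r8⟩ hm
    simp only [pvMul, pvmod_eq, Prod.mk.injEq] at hm
    rw [pvmod_eq]
    exact hm.1
  show (pvLoopA (e + 1) ((pvT 0, pvT 1, pvT 2), (0 : Int))).2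
      = PySem.Int.mod ((pvPowLoop (e + 1) pvI pvM).1 * 4
          + (pvPowLoop (e + 1) pvI pvM).2.1 * 2
          + (pvPowLoop (e + 1) pvI pvM).2.2.1 * 1) 1000000007
  rw [hA, hR]
  exact (key (pvPw pvM (e + 1)) hact).symm
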